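-- pv_equiv track=rewrite | github.com/Fred-B-Berendse/grad-rate-predictions | src/mcmc.py | replace_bad_chars
-- ===== SOURCE A (Python) =====
-- def replace_bad_chars(mystr):
--     '''
--     Replaces invalid characters in a target or feature for use in a GLM
--     formula.
--     '''
--     replace_list = [(' ', '_'), ('+', 'pl'), ('-', '_'), ('0', 'zero'),
--                     ('1', 'one'), ('2', 'two'), ('3', 'three'),
--                     ('4', 'four'), ('5', 'five'), ('6', 'six'),
--                     ('7', 'seven'), ('8', 'eight'), ('9', 'nine')]
--     res = mystr
--     for orig, new in replace_list:
--         res = res.replace(orig, new)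
--     return res.lower()
-- ===== SOURCE B (Python) =====
-- def replace_bad_chars(mystr):
--     '''
--     Replaces invalid characters in a target or feature for use in a GLM
--     formula.
--     '''
--     mapping = {' ': '_', '+': 'pl', '-': '_', '0': 'zero', '1': 'one',
--                '2': 'two', '3': 'three', '4': 'four', '5': 'five',
--                '6': 'six', '7': 'seven', '8': 'eight', '9': 'nine'}
--     parts = []
--     for ch in mystr:
--         parts.append(mapping.get(ch, ch))
--     return ''.join(parts).lower()
-- ===== Notes on version B (the rewrite author's own statement) =====
-- stated objective: idiomatic
-- what changed: A makes 13 sequential whole-string .replace passes; B builds a char-to-string mapping dict once and makes a single pass over the characters, joining mapping.get(ch, ch) and lowercasing the result.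
import Mathlib
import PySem

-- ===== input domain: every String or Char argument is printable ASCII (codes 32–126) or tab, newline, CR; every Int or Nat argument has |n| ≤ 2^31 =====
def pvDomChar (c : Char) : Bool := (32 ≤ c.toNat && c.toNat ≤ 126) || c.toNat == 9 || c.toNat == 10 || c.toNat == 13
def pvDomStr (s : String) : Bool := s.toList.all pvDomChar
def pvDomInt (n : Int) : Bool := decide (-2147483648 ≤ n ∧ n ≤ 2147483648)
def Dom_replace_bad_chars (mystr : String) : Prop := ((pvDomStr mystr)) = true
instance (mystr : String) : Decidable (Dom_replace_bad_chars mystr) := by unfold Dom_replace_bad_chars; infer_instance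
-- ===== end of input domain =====

-- B replaces A's 13 sequential whole-string `.replace` passes by a single pass over the
-- characters driven by a lookup table (more idiomatic, one scan instead of thirteen).

-- ===== PORT A =====
def replace_bad_chars (mystr : String) : String :=
  let replace_list : List (String × String) :=
    [(" ", "_"), ("+", "pl"), ("-", "_"), ("0", "zero"),
     ("1", "one"), ("2", "two"), ("3", "three"),
     ("4", "four"), ("5", "five"), ("6", "six"),
     ("7", "seven"), ("8", "eight"), ("9", "nine")]
  let res := replace_list.foldl (fun res p => PySem.Str.replace res p.1 p.2) mystr
  PySem.Str.lower res

-- ===== PORT B =====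
def replace_bad_chars_alt (mystr : String) : String :=
  let mapping : PySem.Dict Char String := PySem.Dict.mk
    [(' ', "_"), ('+', "pl"), ('-', "_"), ('0', "zero"),
     ('1', "one"), ('2', "two"), ('3', "three"),
     ('4', "four"), ('5', "five"), ('6', "six"),
     ('7', "seven"), ('8', "eight"), ('9', "nine")]
  let parts : List String :=
    mystr.toList.foldl (fun acc ch => acc ++ [mapping.getD ch (String.ofList [ch])]) []
  PySem.Str.lower (PySem.Str.join "" parts)

-- ===== PRECONDITION & SPEC =====
def Spec_replace_bad_chars (mystr : String) (out : String) : Prop := out = replace_bad_chars_alt mystr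
instance (mystr : String) (out : String) : Decidable (Spec_replace_bad_chars mystr out) := by unfold Spec_replace_bad_chars; infer_instance

-- ===== CLAIM (what is proved, stated in full; the proofs are below) =====
def Claim_equal_replace_bad_chars : Prop := ∀ (mystr : String), Dom_replace_bad_chars mystr → Spec_replace_bad_chars mystr (replace_bad_chars mystr)

-- ===== LEMMAS AND PROOFS =====

-- replacing a one-character pattern is a per-character flatMap
theorem replace_go_single (c : Char) (new : List Char) :
    ∀ (l acc : List Char) (fuel : Nat), l.length ≤ fuel →
      PySem.Chars.replace.go [c] new fuel l acc
        = acc.reverse ++ l.flatMap (fun x => if x = c then new else [x]) := by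
  intro l
  induction l with
  | nil =>
    intro acc fuel _
    cases fuel <;> simp [PySem.Chars.replace.go]
  | cons h t ih =>
    intro acc fuel hfuel
    cases fuel with
    | zero => simp at hfuel
    | succ n =>
      simp only [List.length_cons] at hfuel
      simp only [PySem.Chars.replace.go]
      by_cases hc : h = c
      · subst hc
        have hp : List.isPrefixOf [h] (h :: t) = true := by
          simp [List.isPrefixOf]
        rw [if_pos hp]
        simp only [List.length_cons, List.length_nil, List.drop_succ_cons, List.drop_zero]
        rw [ih (new.reverse ++ acc) n (by omega)]
        simp
      · have hp : List.isPrefixOf [c] (h :: t) = false := by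
          simp [List.isPrefixOf]
          exact fun hh => absurd hh.symm hc
        rw [if_neg (by simp [hp])]
        rw [ih (h :: acc) n (by omega)]
        simp [hc]

theorem replace_single (s : List Char) (c : Char) (new : List Char) :
    PySem.Chars.replace s [c] new = s.flatMap (fun x => if x = c then new else [x]) := by
  rw [PySem.Chars.replace]
  simp only [List.isEmpty_cons, Bool.false_eq_true, if_false]
  simpa using replace_go_single c new s [] s.length le_rfl

-- joining with the empty separator is flattening
theorem join_empty (ps : List (List Char)) : PySem.Chars.join [] ps = ps.flatten := by
  induction ps with
  | nil => rfl
  | cons h t ih =>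
    cases t with
    | nil => simp [PySem.Chars.join, List.intercalate]
    | cons h2 t2 =>
      simp only [PySem.Chars.join, List.intercalate, List.intersperse] at *
      simp_all

-- A's thirteen per-character replaces as a fold of flatMaps
def pvStep (c : Char) (new : List Char) (x : Char) : List Char :=
  if x = c then new else [x]

def pvSteps : List (Char → List Char) :=
  [pvStep ' ' ['_'], pvStep '+' ['p','l'], pvStep '-' ['_'], pvStep '0' ['z','e','r','o'],
   pvStep '1' ['o','n','e'], pvStep '2' ['t','w','o'], pvStep '3' ['t','h','r','e','e'],
   pvStep '4' ['f','o','u','r'], pvStep '5' ['f','i','v','e'], pvStep '6' ['s','i','x'],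
   pvStep '7' ['s','e','v','e','n'], pvStep '8' ['e','i','g','h','t'], pvStep '9' ['n','i','n','e']]

-- the composite per-character effect of A's thirteen replaces
def pvChain (x : Char) : List Char :=
  pvSteps.foldl (fun acc f => acc.flatMap f) [x]

-- B's per-character mapping
def pvMapB (x : Char) : List Char :=
  ((PySem.Dict.mk
    [(' ', ("_" : String)), ('+', "pl"), ('-', "_"), ('0', "zero"),
     ('1', "one"), ('2', "two"), ('3', "three"),
     ('4', "four"), ('5', "five"), ('6', "six"),
     ('7', "seven"), ('8', "eight"), ('9', "nine")]).getD x (String.ofList [x])).toList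

-- a left fold of flatMaps acts characterwise
theorem fold_flatMap (ps : List (Char → List Char)) (s : List Char) :
    ps.foldl (fun acc f => acc.flatMap f) s
      = s.flatMap (fun c => ps.foldl (fun acc f => acc.flatMap f) [c]) := by
  induction ps generalizing s with
  | nil => simp
  | cons f rest ih =>
    simp only [List.foldl_cons]
    rw [ih (s.flatMap f), List.flatMap_assoc]
    apply List.flatMap_congr
    intro x _
    rw [show List.flatMap f [x] = f x by simp]
    exact (ih (f x)).symm

theorem chain_eq_mapB (x : Char) : pvChain x = pvMapB x := by
  by_cases h : x ∈ ([' ', '+', '-', '0', '1', '2', '3', '4', '5', '6', '7', '8', '9'] : List Char)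
  · simp only [List.mem_cons, List.not_mem_nil, or_false] at h
    rcases h with rfl|rfl|rfl|rfl|rfl|rfl|rfl|rfl|rfl|rfl|rfl|rfl|rfl <;> decide
  · simp only [List.mem_cons, List.not_mem_nil, or_false, not_or] at h
    obtain ⟨h1, h2, h3, h4, h5, h6, h7, h8, h9, h10, h11, h12, h13⟩ := h
    have hb : pvMapB x = [x] := by
      simp [pvMapB, PySem.Dict.getD, PySem.Dict.get?,
            Ne.symm h1, Ne.symm h2, Ne.symm h3, Ne.symm h4, Ne.symm h5, Ne.symm h6,
            Ne.symm h7, Ne.symm h8, Ne.symm h9, Ne.symm h10, Ne.symm h11, Ne.symm h12,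
            Ne.symm h13]
    rw [hb]
    simp [pvChain, pvSteps, pvStep, List.foldl,
          h1, h2, h3, h4, h5, h6, h7, h8, h9, h10, h11, h12, h13]

-- A's chain of replaces is one flatMap of B's per-character mapping
theorem chars_equal (s : List Char) :
    PySem.Chars.replace (PySem.Chars.replace (PySem.Chars.replace (PySem.Chars.replace
      (PySem.Chars.replace (PySem.Chars.replace (PySem.Chars.replace (PySem.Chars.replace
      (PySem.Chars.replace (PySem.Chars.replace (PySem.Chars.replace (PySem.Chars.replace
      (PySem.Chars.replace s [' '] ['_']) ['+'] ['p','l']) ['-'] ['_'])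
      ['0'] ['z','e','r','o']) ['1'] ['o','n','e']) ['2'] ['t','w','o'])
      ['3'] ['t','h','r','e','e']) ['4'] ['f','o','u','r']) ['5'] ['f','i','v','e'])
      ['6'] ['s','i','x']) ['7'] ['s','e','v','e','n']) ['8'] ['e','i','g','h','t'])
      ['9'] ['n','i','n','e']
    = s.flatMap pvMapB := by
  simp only [replace_single]
  have h : (((((((((((((s.flatMap (fun x => if x = ' ' then ['_'] else [x])).flatMap
      (fun x => if x = '+' then ['p','l'] else [x])).flatMap
      (fun x => if x = '-' then ['_'] else [x])).flatMap
      (fun x => if x = '0' then ['z','e','r','o'] else [x])).flatMap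
      (fun x => if x = '1' then ['o','n','e'] else [x])).flatMap
      (fun x => if x = '2' then ['t','w','o'] else [x])).flatMap
      (fun x => if x = '3' then ['t','h','r','e','e'] else [x])).flatMap
      (fun x => if x = '4' then ['f','o','u','r'] else [x])).flatMap
      (fun x => if x = '5' then ['f','i','v','e'] else [x])).flatMap
      (fun x => if x = '6' then ['s','i','x'] else [x])).flatMap
      (fun x => if x = '7' then ['s','e','v','e','n'] else [x])).flatMap
      (fun x => if x = '8' then ['e','i','g','h','t'] else [x])).flatMap
      (fun x => if x = '9' then ['n','i','n','e'] else [x]))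
      = pvSteps.foldl (fun acc f => acc.flatMap f) s := by
    simp only [pvSteps, List.foldl_cons, List.foldl_nil]
    rfl
  rw [h, fold_flatMap]
  exact List.flatMap_congr fun x _ => chain_eq_mapB x

-- singleton flattening for B's join
theorem flatten_map_single (f : Char → List Char) (l : List Char) :
    (l.map (fun x => [f x])).flatten.flatten = (l.map f).flatten := by
  induction l <;> simp_all

-- ===== VERDICT (by name: the statement is the Claim_ definition above) =====
theorem replace_bad_chars_spec : Claim_equal_replace_bad_chars := by
  intro mystr _
  unfold Spec_replace_bad_chars replace_bad_chars replace_bad_chars_alt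
  apply String.toList_injective
  simp only [List.foldl_cons, List.foldl_nil, PySem.Str.toList_lower,
    PySem.Str.toList_replace, PySem.Str.toList_join,
    PySem.List.foldl_append_eq_flatMap, List.nil_append]
  rw [show ("" : String).toList = [] from rfl, join_empty]
  apply congrArg
  rw [show (" " : String).toList = [' '] from rfl]
  rw [show ("+" : String).toList = ['+'] from rfl, show ("pl" : String).toList = ['p','l'] from rfl]
  rw [show ("-" : String).toList = ['-'] from rfl, show ("_" : String).toList = ['_'] from rfl]
  rw [show ("0" : String).toList = ['0'] from rfl, show ("zero" : String).toList = ['z','e','r','o'] from rfl]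
  rw [show ("1" : String).toList = ['1'] from rfl, show ("one" : String).toList = ['o','n','e'] from rfl]
  rw [show ("2" : String).toList = ['2'] from rfl, show ("two" : String).toList = ['t','w','o'] from rfl]
  rw [show ("3" : String).toList = ['3'] from rfl, show ("three" : String).toList = ['t','h','r','e','e'] from rfl]
  rw [show ("4" : String).toList = ['4'] from rfl, show ("four" : String).toList = ['f','o','u','r'] from rfl]
  rw [show ("5" : String).toList = ['5'] from rfl, show ("five" : String).toList = ['f','i','v','e'] from rfl]
  rw [show ("6" : String).toList = ['6'] from rfl, show ("six" : String).toList = ['s','i','x'] from rfl]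
  rw [show ("7" : String).toList = ['7'] from rfl, show ("seven" : String).toList = ['s','e','v','e','n'] from rfl]
  rw [show ("8" : String).toList = ['8'] from rfl, show ("eight" : String).toList = ['e','i','g','h','t'] from rfl]
  rw [show ("9" : String).toList = ['9'] from rfl, show ("nine" : String).toList = ['n','i','n','e'] from rfl]
  rw [chars_equal]
  simp only [List.flatMap_def, List.map_flatten, List.map_map, Function.comp_def, List.map_cons, List.map_nil]
  rw [flatten_map_single]
  rfl
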